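-- pv_equiv track=rewrite | github.com/Squinc-21/slavic | catchLines_new.py | check_superscript
-- ===== SOURCE A (Python) =====
-- def get_y_profile(img):
--     width = len(img[0])
--     height = len(img)
--     y_profiles = []
--
--     for y in range(height):
--         bright = 0
--         for x in range(width):
--             pix = img[y][x]
--             if pix > 220:  # BLACK
--                 bright += 1
--         y_profiles.append(bright)
--
--     return y_profiles
--
-- def check_superscript(arr):
--     if not arr:
--         return None
--     profile = get_y_profile(arr)
--     i = 0
--     while profile[i] > 0 and i < len(arr) - 1:
--         i += 1
--     profile = profile[i:]
--     try:
--         idx_zero = next(x for x, val in enumerate(profile) if val == 0)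
--         idx_non_zero = next(x for x, val in enumerate(profile) if val > 0)
--         return idx_non_zero + i
--     except StopIteration:
--         return None
-- ===== SOURCE B (Python) =====
-- def check_superscript(arr):
--     # Single lazy pass over the rows: skip the leading bright rows, then
--     # return the index of the first bright row after the first dark one.
--     if not arr:
--         return None
--     width = len(arr[0])
--     it = enumerate(arr)
--     for y, row in it:
--         if not any(row[x] > 220 for x in range(width)):
--             break
--     else:
--         return None
--     for y, row in it:
--         if any(row[x] > 220 for x in range(width)):
--             return y
--     return None
-- ===== Notes on version B (the rewrite author's own statement) =====
-- stated objective: simpler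
-- what changed: B replaces A's precomputed full brightness profile plus index-while-loop, slicing and two enumerate generators by one lazy two-phase scan over the rows (skip leading bright rows, then return the index of the next bright row), testing each row with any() and stopping as soon as the answer is known.
import Mathlib
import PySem

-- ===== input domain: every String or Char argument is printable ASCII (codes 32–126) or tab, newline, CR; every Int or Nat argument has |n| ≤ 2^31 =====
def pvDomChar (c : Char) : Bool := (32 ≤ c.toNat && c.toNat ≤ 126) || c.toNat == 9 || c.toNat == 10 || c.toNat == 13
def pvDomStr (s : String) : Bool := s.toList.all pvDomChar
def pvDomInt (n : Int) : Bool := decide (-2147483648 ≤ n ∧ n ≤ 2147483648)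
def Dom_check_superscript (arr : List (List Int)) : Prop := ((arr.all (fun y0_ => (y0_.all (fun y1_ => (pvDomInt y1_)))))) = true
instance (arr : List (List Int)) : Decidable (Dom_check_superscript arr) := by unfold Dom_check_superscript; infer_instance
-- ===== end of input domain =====

-- B replaces A's full precomputed brightness profile + while-loop/slice/generators by one
-- lazy two-phase scan over the rows (skip leading bright rows, return the next bright index).

-- ===== PORT A =====
def get_y_profile (img : List (List Int)) : List Int :=
  let width := ((PySem.List.pyGet? img 0).getD []).length
  let height := img.length
  (PySem.List.pyRange 0 (height : Int) 1).foldl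
    (fun y_profiles y =>
      let bright : Int :=
        (PySem.List.pyRange 0 (width : Int) 1).foldl
          (fun bright x =>
            let pix := PySem.List.pyGetD (PySem.List.pyGetD img y []) x 0
            if pix > 220 then bright + 1 else bright) 0
      y_profiles ++ [bright]) []

-- the 'while profile[i] > 0 and i < len(arr)-1' loop; fuel = profile.length bounds its trips
def check_loop (profile : List Int) (n : Int) : Nat → Int → Int
  | 0, i => i
  | fuel+1, i =>
    if PySem.List.pyGetD profile i 0 > 0 ∧ i < n - 1 then check_loop profile n fuel (i+1) else i

def check_superscript (arr : List (List Int)) : Option Int :=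
  if arr = [] then none
  else
    let profile := get_y_profile arr
    let i := check_loop profile (PySem.List.len arr) profile.length 0
    let profile2 := PySem.List.slice profile (some i) none
    match profile2.findIdx? (fun v => v == 0) with
    | none => none
    | some _ =>
      match profile2.findIdx? (fun v => decide (v > 0)) with
      | none => none
      | some k => some ((k : Int) + i)

-- ===== PORT B =====
def brightRow (width : Nat) (row : List Int) : Bool :=
  (PySem.List.pyRange 0 (width : Int) 1).any (fun x => decide (PySem.List.pyGetD row x 0 > 220))

-- phase 2: first bright row from here on
def bFind (width : Nat) : List (List Int) → Int → Option Int
  | [], _ => none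
  | r :: rs, y => if brightRow width r then some y else bFind width rs (y + 1)

-- phase 1: skip leading bright rows, then hand over to phase 2
def bSkip (width : Nat) : List (List Int) → Int → Option Int
  | [], _ => none
  | r :: rs, y => if brightRow width r then bSkip width rs (y + 1) else bFind width rs (y + 1)

def check_superscript_alt (arr : List (List Int)) : Option Int :=
  match arr with
  | [] => none
  | r0 :: _ => bSkip r0.length arr 0

-- ===== PRECONDITION & SPEC =====
-- Pre_ excludes exactly the ragged inputs with a row shorter than the first row, on
-- which Python A raises IndexError while profiling; A returns normally everywhere else.
def Pre_check_superscript (arr : List (List Int)) : Prop :=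
  ∀ row ∈ arr, (arr.headD []).length ≤ row.length
instance (arr : List (List Int)) : Decidable (Pre_check_superscript arr) := by
  unfold Pre_check_superscript; infer_instance
def pvWitness_check_superscript : List (List Int) := [[0, 0], [230, 0]]
def Spec_check_superscript (arr : List (List Int)) (out : Option Int) : Prop := out = check_superscript_alt arr
instance (arr : List (List Int)) (out : Option Int) : Decidable (Spec_check_superscript arr out) := by unfold Spec_check_superscript; infer_instance

-- ===== CLAIM (what is proved, stated in full; the proofs are below) =====
def Claim_equal_check_superscript : Prop := ∀ (arr : List (List Int)), Dom_check_superscript arr → Pre_check_superscript arr → Spec_check_superscript arr (check_superscript arr)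

-- ===== LEMMAS AND PROOFS =====

-- number of bright pixels A counts in a row, as a countP
def Cnt (w : Nat) (row : List Int) : Nat :=
  (PySem.List.pyRange 0 (w : Int) 1).countP (fun x => decide (PySem.List.pyGetD row x 0 > 220))

theorem foldl_cnt (row : List Int) (l : List Int) (a : Int) :
    l.foldl (fun b x => if PySem.List.pyGetD row x 0 > 220 then b + 1 else b) a
      = a + ((l.countP (fun x => decide (PySem.List.pyGetD row x 0 > 220)) : Nat) : Int) := by
  induction l generalizing a with
  | nil => simp
  | cons x xs ih =>
    by_cases h : PySem.List.pyGetD row x 0 > 220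
    · simp [h, ih]
      ring
    · simp [h, ih]

theorem bright_eq (w : Nat) (row : List Int) :
    decide (((Cnt w row : Nat) : Int) > 0) = brightRow w row := by
  by_cases h : 0 < Cnt w row
  · have hb : brightRow w row = true := by
      have := List.countP_pos_iff.mp h
      simpa [brightRow, List.any_eq_true, Cnt] using this
    simp [hb]
    exact_mod_cast h
  · have h0 : Cnt w row = 0 := by omega
    have hb : brightRow w row = false := by
      have := List.countP_eq_zero.mp h0
      simpa [brightRow, List.any_eq_false, Cnt] using this
    simp [hb, h0]

theorem map_profile (arr : List (List Int)) (f : List Int → Int) :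
    (PySem.List.pyRange 0 ((arr.length : Nat) : Int) 1).map (fun y => f (PySem.List.pyGetD arr y [])) = arr.map f := by
  conv_rhs => rw [← PySem.List.map_pyGetD_pyRange_zero arr ([] : List Int), List.map_map]
  simp [PySem.List.len, Function.comp]

theorem bright_iff (w : Nat) (row : List Int) :
    brightRow w row = true ↔ 0 < Cnt w row := by
  rw [← bright_eq]
  simp

theorem profile_eq (r0 : List Int) (rs : List (List Int)) :
    get_y_profile (r0 :: rs) = (r0 :: rs).map (fun row => ((Cnt r0.length row : Nat) : Int)) := by
  unfold get_y_profile
  simp only [PySem.List.pyGet?_zero_cons, Option.getD_some,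
    PySem.List.foldl_append_singleton_eq_map, List.nil_append, foldl_cnt, zero_add]
  exact map_profile (r0 :: rs) (fun row => ((Cnt r0.length row : Nat) : Int))

theorem check_loop_spec (profile : List Int) (fuel i : Nat)
    (hi : i < profile.length) (hfuel : profile.length ≤ fuel + i) :
    check_loop profile (profile.length : Int) fuel (i : Int)
      = ((min (i + ((profile.drop i).findIdx fun v => !decide (v > 0))) (profile.length - 1) : Nat) : Int) := by
  induction fuel generalizing i with
  | zero => omega
  | succ fuel ih =>
    have hget : PySem.List.pyGetD profile (i : Int) 0 = profile[i] := by
      simp [PySem.List.pyGetD_natCast, List.getD_eq_getElem?_getD, List.getElem?_eq_getElem hi]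
    have hdrop : profile.drop i = profile[i] :: profile.drop (i + 1) := List.drop_eq_getElem_cons hi
    by_cases hp : profile[i] > 0
    · by_cases hlast : i < profile.length - 1
      · have hcond : PySem.List.pyGetD profile (i : Int) 0 > 0 ∧ (i : Int) < (profile.length : Int) - 1 :=
          ⟨by rw [hget]; exact hp, by omega⟩
        rw [check_loop, if_pos hcond]
        have hcast : ((i : Int) + 1) = (((i + 1 : Nat) : Nat) : Int) := by push_cast; ring
        rw [hcast, ih (i + 1) (by omega) (by omega), hdrop]
        simp only [List.findIdx_cons, hp, decide_true, Bool.not_true, cond_false]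
        congr 1
        omega
      · rw [check_loop, if_neg (by omega), hdrop]
        simp only [List.findIdx_cons, hp, decide_true, Bool.not_true, cond_false]
        congr 1
        omega
    · rw [check_loop, if_neg (by rw [hget]; exact fun h => hp h.1), hdrop]
      simp only [List.findIdx_cons, hp, decide_false, Bool.not_false, cond_true]
      congr 1
      omega

theorem bFind_spec (w : Nat) (l : List (List Int)) (y : Int) :
    bFind w l y = (l.findIdx? (fun r => brightRow w r)).map (fun j => y + (j : Int)) := by
  induction l generalizing y with
  | nil => simp [bFind]
  | cons r rs ih =>
    by_cases h : brightRow w r = true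
    · simp [bFind, h, List.findIdx?_cons]
    · simp only [bFind, h, List.findIdx?_cons, if_neg, Bool.false_eq_true, not_false_iff]
      rw [ih]
      cases rs.findIdx? (fun r => brightRow w r)
      · simp
      · simp
        ring

theorem bSkip_spec (w : Nat) (l : List (List Int)) (y : Int) :
    bSkip w l y =
      match l.findIdx? (fun r => !brightRow w r) with
      | none => none
      | some d => ((l.drop (d+1)).findIdx? (fun r => brightRow w r)).map
          (fun j => y + (d : Int) + 1 + (j : Int)) := by
  induction l generalizing y with
  | nil => simp [bSkip]
  | cons r rs ih =>
    by_cases h : brightRow w r = true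
    · simp only [bSkip, ite_true, List.findIdx?_cons, Bool.not_eq_true', h]
      rw [ih]
      cases hr : rs.findIdx? (fun r => !brightRow w r) with
      | none => simp
      | some d =>
        cases hj : (rs.drop (d+1)).findIdx? (fun r => brightRow w r)
        · simp [hj, List.drop_succ_cons]
        · simp [hj, List.drop_succ_cons]
          ring
    · have h' : brightRow w r = false := by simpa using h
      simp only [bSkip, h', Bool.false_eq_true, ite_false, List.findIdx?_cons, Bool.not_false, ite_true]
      rw [bFind_spec]
      cases hj : rs.findIdx? (fun r => brightRow w r) <;> simp [hj, List.drop_succ_cons]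

theorem ports_agree (arr : List (List Int)) : check_superscript arr = check_superscript_alt arr := by
  cases arr with
  | nil => rfl
  | cons r0 rs =>
    have hne : (r0 :: rs) ≠ ([] : List (List Int)) := by simp
    simp only [check_superscript, if_neg hne, check_superscript_alt]
    rw [profile_eq r0 rs]
    have hlen : PySem.List.len (r0 :: rs) = (((r0 :: rs).map (fun row => ((Cnt r0.length row : Nat) : Int))).length : Int) := by
      simp [PySem.List.len]
    rw [hlen]
    have hloop := check_loop_spec ((r0 :: rs).map (fun row => ((Cnt r0.length row : Nat) : Int)))
      ((r0 :: rs).map (fun row => ((Cnt r0.length row : Nat) : Int))).length 0 (by simp) (by omega)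
    simp only [Nat.cast_zero, List.drop_zero, Nat.zero_add] at hloop
    rw [hloop]
    set f : List Int → Int := fun row => ((Cnt r0.length row : Nat) : Int) with hf
    set d := List.findIdx (fun v => !decide (v > 0)) ((r0 :: rs).map f) with hd
    have hdm : List.findIdx (fun r => !brightRow r0.length r) (r0 :: rs) = d := by
      rw [hd, List.findIdx_map]
      congr 1
      funext row
      simp only [Function.comp, hf, bright_eq]
    set L := ((r0 :: rs).map f).length with hL
    have hL1 : 1 ≤ L := by simp [hL]
    have hdle : d ≤ L := by rw [hd, hL]; exact List.findIdx_le_length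
    by_cases hdL : d < L
    · have hmin : min d (L - 1) = d := by omega
      rw [hmin, PySem.List.slice_from_natCast]
      have hdlt : d < ((r0 :: rs).map f).length := hdL
      have hdrop : ((r0 :: rs).map f).drop d = ((r0 :: rs).map f)[d] :: ((r0 :: rs).map f).drop (d + 1) :=
        List.drop_eq_getElem_cons hdlt
      have hq : (!decide (((r0 :: rs).map f)[d] > 0)) = true := by
        have := List.findIdx_getElem (p := fun v => !decide (v > 0)) (w := hd ▸ hdlt)
        simpa [← hd] using this
      have hz : ((r0 :: rs).map f)[d] = (0 : Int) := by
        have h2 : ¬ (((r0 :: rs).map f)[d] > 0) := by simpa using hq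
        have h3 : (0 : Int) ≤ ((r0 :: rs).map f)[d] := by
          rw [List.getElem_map]
          exact Int.natCast_nonneg _
        omega
      have hfind2 : List.findIdx? (fun v => decide (v > 0)) (((r0 :: rs).map f).drop (d + 1))
          = ((r0 :: rs).drop (d + 1)).findIdx? (fun r => brightRow r0.length r) := by
        rw [← List.map_drop, List.findIdx?_map]
        congr 1
        funext row
        simp only [Function.comp, hf, bright_eq]
      have hsome : List.findIdx? (fun r => !brightRow r0.length r) (r0 :: rs) = some d :=
        List.findIdx?_eq_some_iff_findIdx_eq.mpr ⟨by simpa [hL] using hdL, hdm⟩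
      have hB : bSkip r0.length (r0 :: rs) 0
          = (((r0 :: rs).drop (d + 1)).findIdx? (fun r => brightRow r0.length r)).map
              (fun j => 0 + (d : Int) + 1 + (j : Int)) := by
        rw [bSkip_spec, hsome]
      rw [hdrop, hz, List.findIdx?_cons, List.findIdx?_cons, hfind2, hB]
      cases hX : ((r0 :: rs).drop (d + 1)).findIdx? (fun r => brightRow r0.length r) with
      | none => simp
      | some j =>
        simp only [Option.map_some]
        norm_num
        ring
    · have hdeq : d = L := by omega
      have hmin : min d (L - 1) = L - 1 := by omega
      rw [hmin, PySem.List.slice_from_natCast]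
      have hlt : L - 1 < ((r0 :: rs).map f).length := by rw [← hL]; omega
      have hdrop : ((r0 :: rs).map f).drop (L - 1)
          = ((r0 :: rs).map f)[L - 1] :: ((r0 :: rs).map f).drop (L - 1 + 1) :=
        List.drop_eq_getElem_cons hlt
      have hall : ∀ v ∈ (r0 :: rs).map f, (!decide (v > 0)) = false := by
        have hfi : List.findIdx (fun v => !decide (v > 0)) ((r0 :: rs).map f) = ((r0 :: rs).map f).length := by
          rw [← hd, hdeq, hL]
        exact fun v hv => List.findIdx_eq_length.mp hfi v hv
      have hpos : ((r0 :: rs).map f)[L - 1] > 0 := by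
        have := hall _ (List.getElem_mem hlt)
        simpa using this
      have hne0 : ((r0 :: rs).map f)[L - 1] ≠ 0 := by omega
      have hnone : List.findIdx? (fun r => !brightRow r0.length r) (r0 :: rs) = none := by
        rw [List.findIdx?_eq_none_iff]
        intro r hr
        have h1 := hall (f r) (List.mem_map_of_mem hr)
        have h2 : 0 < Cnt r0.length r := by
          simp only [hf, Bool.not_eq_false', decide_eq_true_eq] at h1
          exact_mod_cast h1
        simp [(bright_iff r0.length r).mpr h2]
      have hsucc : L - 1 + 1 = L := by omega
      have hdropL : ((r0 :: rs).map f).drop L = [] := by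
        rw [hL]
        exact List.drop_length
      have hB : bSkip r0.length (r0 :: rs) 0 = none := by
        rw [bSkip_spec, hnone]
      rw [hdrop, hsucc, hdropL, hB, List.findIdx?_cons]
      have hbeq : (((r0 :: rs).map f)[L - 1] == (0 : Int)) = false := by
        simpa using hne0
      rw [hbeq]
      simp

-- ===== VERDICT (by name: the statement is the Claim_ definition above) =====
theorem check_superscript_spec : Claim_equal_check_superscript := by
  intro arr _ _
  exact ports_agree arr
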